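-- pv_equiv track=rewrite | github.com/FdelMazo/FIUBA-nx | utils.py | _anonymize_walk
-- ===== SOURCE A (Python) =====
-- def _anonymize_walk(camino):
--     translate = {}
--     camino_trans = []
--     for v in camino:
--         if v not in translate:
--             translate[v] = len(translate) + 1
--         camino_trans.append(translate[v])
--     return camino_trans
-- ===== SOURCE B (Python) =====
-- def _anonymize_walk(camino):
--     # per-element closed form, no accumulator: the label of v is the number of
--     # distinct vertices in the prefix ending at v's first occurrence
--     return [len(set(camino[:camino.index(v) + 1])) for v in camino]
-- ===== Notes on version B (the rewrite author's own statement) =====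
-- stated objective: alternative
-- what changed: Drops A's dict accumulator entirely: each label is computed independently by a closed form, the count of distinct values in the prefix up to the element's first occurrence (list.index + set of a slice), instead of growing a translation table while emitting labels.
import Mathlib
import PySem

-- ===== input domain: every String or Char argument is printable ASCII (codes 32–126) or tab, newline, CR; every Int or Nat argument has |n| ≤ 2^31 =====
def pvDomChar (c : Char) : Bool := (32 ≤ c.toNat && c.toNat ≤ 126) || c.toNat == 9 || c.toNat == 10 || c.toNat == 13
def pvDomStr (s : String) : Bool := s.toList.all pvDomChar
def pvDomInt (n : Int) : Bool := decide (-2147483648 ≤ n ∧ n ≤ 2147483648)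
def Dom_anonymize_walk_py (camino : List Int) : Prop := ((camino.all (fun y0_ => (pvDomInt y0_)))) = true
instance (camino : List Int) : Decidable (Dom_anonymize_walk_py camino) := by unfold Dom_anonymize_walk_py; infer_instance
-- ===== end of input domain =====

-- B drops A's dict accumulator: each label is computed independently as the number of
-- distinct vertices in the prefix ending at the element's first occurrence; objective:
-- alternative (B is quadratic where A is linear). Both programs are total and agree everywhere.

-- ===== PORT A =====
-- for v in camino: if v not in translate: translate[v] = len(translate)+1; camino_trans.append(translate[v])
def anonymizeLoop : List Int → PySem.Dict Int Int → List Int → List Int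
  | [], _, out => out
  | v :: rest, tr, out =>
    match tr.get? v with
    | some n => anonymizeLoop rest tr (out ++ [n])        -- v already in translate
    | none =>                                             -- translate[v] = len(translate) + 1
      let n : Int := (tr.size : Int) + 1
      anonymizeLoop rest (tr.insert v n) (out ++ [n])

def anonymize_walk_py (camino : List Int) : List Int :=
  anonymizeLoop camino PySem.Dict.empty []

-- ===== PORT B =====
-- [len(set(camino[:camino.index(v) + 1])) for v in camino]
-- camino.index(v) never raises here (v is drawn from camino), so the none branch is unreachable.
def anonymize_walk_py_alt (camino : List Int) : List Int :=
  camino.map (fun v =>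
    match PySem.List.index? camino v with
    | some j => ((PySem.Set.ofList (PySem.List.slice camino none (some ((j : Int) + 1)))).length : Int)
    | none => 0)

-- ===== PRECONDITION & SPEC =====
def Spec_anonymize_walk_py (camino : List Int) (out : List Int) : Prop := out = anonymize_walk_py_alt camino
instance (camino : List Int) (out : List Int) : Decidable (Spec_anonymize_walk_py camino out) := by unfold Spec_anonymize_walk_py; infer_instance

-- ===== CLAIM (what is proved, stated in full; the proofs are below) =====
def Claim_equal_anonymize_walk_py : Prop := ∀ (camino : List Int), Dom_anonymize_walk_py camino → Spec_anonymize_walk_py camino (anonymize_walk_py camino)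

-- ===== LEMMAS AND PROOFS =====

-- A-side: the translation dict A has built after processing the distinct prefix u
def dictOf (u : List Int) : PySem.Dict Int Int :=
  (PySem.List.enumerate u).foldl (fun d p => d.insert p.2 (p.1 + 1)) PySem.Dict.empty

theorem dictOf_append_singleton (u : List Int) (v : Int) :
    dictOf (u ++ [v]) = (dictOf u).insert v ((u.length : Int) + 1) := by
  unfold dictOf
  rw [PySem.List.enumerate_append, List.foldl_append]
  simp [PySem.List.enumerate_cons, PySem.List.enumerate_nil]

theorem get?_dictOf (u : List Int) (hu : u.Nodup) (v : Int) :
    (dictOf u).get? v = if v ∈ u then some ((u.idxOf v : Int) + 1) else none := by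
  induction u using List.reverseRecOn with
  | nil => simp [dictOf, PySem.List.enumerate_nil]
  | append_singleton r x ih =>
    have hr : r.Nodup := (List.nodup_append.mp hu).1
    have hx : x ∉ r := by
      intro hmem
      exact (List.disjoint_of_nodup_append hu) hmem (List.mem_singleton_self x)
    rw [dictOf_append_singleton, PySem.Dict.get?_insert, ih hr]
    by_cases hvx : v = x
    · subst hvx
      simp [hx, List.idxOf_append_of_notMem hx]
    · by_cases hvr : v ∈ r
      · simp [hvx, hvr, List.idxOf_append_of_mem hvr]
      · have : v ∉ r ++ [x] := by simp [hvr, hvx]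
        simp [hvx, hvr, this]

theorem size_dictOf (u : List Int) (hu : u.Nodup) : (dictOf u).size = u.length := by
  have hfresh : ∀ p ∈ PySem.List.enumerate u 0, (PySem.Dict.empty : PySem.Dict Int Int).contains p.2 = false := by
    intro p _; simp [PySem.Dict.contains_empty]
  have hnd : ((PySem.List.enumerate u 0).map (·.2)).Nodup := by
    rw [PySem.List.map_snd_enumerate]; exact hu
  have := PySem.Dict.items_foldl_insert_fresh (PySem.List.enumerate u 0)
      (fun p => p.2) (fun p => p.1 + 1) PySem.Dict.empty hfresh hnd
  unfold dictOf
  simp only [PySem.Dict.size, this]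
  simp [PySem.List.length_enumerate, PySem.Dict.empty]

theorem idxOf_update_of_mem (u l : List Int) (v : Int) (hv : v ∈ u) :
    (PySem.Set.update u l).idxOf v = u.idxOf v := by
  rw [PySem.Set.update_eq_append_filter]
  exact List.idxOf_append_of_mem hv

theorem loop_spec (l : List Int) : ∀ (u out : List Int), u.Nodup →
    anonymizeLoop l (dictOf u) out
      = out ++ l.map (fun v => ((PySem.Set.update u l).idxOf v : Int) + 1) := by
  induction l with
  | nil => intro u out _; simp [anonymizeLoop, PySem.Set.update_nil]
  | cons v rest ih =>
    intro u out hu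
    by_cases hv : v ∈ u
    · have hadd : PySem.Set.add u v = u := by
        simp [PySem.Set.add, PySem.Set.contains, hv]
      have hupd : PySem.Set.update u (v :: rest) = PySem.Set.update u rest := by
        rw [PySem.Set.update_cons, hadd]
      rw [show anonymizeLoop (v :: rest) (dictOf u) out
            = anonymizeLoop rest (dictOf u) (out ++ [((u.idxOf v : Int) + 1)]) by
          simp [anonymizeLoop, get?_dictOf u hu v, hv]]
      rw [ih u _ hu, hupd]
      simp only [List.map_cons, List.append_assoc, List.cons_append, List.nil_append]
      rw [idxOf_update_of_mem u rest v hv]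
    · have hadd : PySem.Set.add u v = u ++ [v] := by
        simp [PySem.Set.add, PySem.Set.contains, hv]
      have hupd : PySem.Set.update u (v :: rest) = PySem.Set.update (u ++ [v]) rest := by
        rw [PySem.Set.update_cons, hadd]
      have hu' : (u ++ [v]).Nodup := by
        simp only [List.nodup_append, List.nodup_singleton, true_and]
        exact ⟨hu, fun a ha b hb hab => hv (by simp at hb; subst hb; rwa [hab] at ha)⟩
      rw [show anonymizeLoop (v :: rest) (dictOf u) out
            = anonymizeLoop rest (dictOf (u ++ [v])) (out ++ [((u.length : Int) + 1)]) by
          simp [anonymizeLoop, get?_dictOf u hu v, hv, size_dictOf u hu,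
                dictOf_append_singleton]]
      rw [ih (u ++ [v]) _ hu', hupd]
      simp only [List.map_cons, List.append_assoc, List.cons_append, List.nil_append]
      have hvmem : v ∈ u ++ [v] := by simp
      rw [idxOf_update_of_mem (u ++ [v]) rest v hvmem,
          List.idxOf_append_of_notMem hv]
      simp [List.idxOf_cons_self]

-- B-side: distinct count of the prefix ending at the first occurrence of v
-- equals v's rank in the deduplicated list
theorem take_firstIdx_length (l : List Int) : ∀ (u : List Int) (v : Int), v ∈ l → v ∉ u →
    (PySem.Set.update u (l.take (l.idxOf v + 1))).length
      = (PySem.Set.update u l).idxOf v + 1 := by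
  induction l with
  | nil => intro u v hv _; simp at hv
  | cons h t ih =>
    intro u v hv hvu
    by_cases hvh : v = h
    · subst hvh
      have hadd : PySem.Set.add u v = u ++ [v] := by
        simp [PySem.Set.add, PySem.Set.contains, hvu]
      have hm : v ∈ u ++ [v] := by simp
      rw [List.idxOf_cons_self]
      simp only [List.take_succ_cons, List.take_zero]
      rw [PySem.Set.update_cons, hadd, PySem.Set.update_nil,
          PySem.Set.update_cons, hadd, idxOf_update_of_mem (u ++ [v]) t v hm,
          List.idxOf_append_of_notMem hvu]
      simp [List.idxOf_cons_self]
    · have hvt : v ∈ t := by cases hv with | head => exact absurd rfl hvh | tail _ h => exact h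
      have hvu' : v ∉ PySem.Set.add u h := by
        intro hmem
        rcases (PySem.Set.mem_add u h v).mp hmem with h1 | h1
        · exact hvu h1
        · exact hvh h1
      rw [show (h :: t).idxOf v = t.idxOf v + 1 by
            simp [Ne.symm hvh]]
      simp only [List.take_succ_cons]
      rw [PySem.Set.update_cons, PySem.Set.update_cons,
          ih (PySem.Set.add u h) v hvt hvu']

theorem index?_of_mem (l : List Int) (v : Int) (hv : v ∈ l) :
    PySem.List.index? l v = some (l.idxOf v) := by
  induction l with
  | nil => simp at hv
  | cons h t ih =>
    by_cases hvh : v = h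
    · subst hvh
      rw [PySem.List.index?_cons_self v t]
      simp [List.idxOf_cons_self]
    · have hvt : v ∈ t := by cases hv with | head => exact absurd rfl hvh | tail _ h => exact h
      rw [PySem.List.index?_cons_of_ne t (Ne.symm hvh), ih hvt]
      simp [Ne.symm hvh]

-- B computes the same per-element closed form
theorem alt_eq_map (camino : List Int) :
    anonymize_walk_py_alt camino
      = camino.map (fun v => (((PySem.Set.ofList camino).idxOf v : Int) + 1)) := by
  unfold anonymize_walk_py_alt
  apply List.map_congr_left
  intro v hv
  rw [index?_of_mem camino v hv]
  show ((PySem.Set.ofList (PySem.List.slice camino none (some (((camino.idxOf v : Nat) : Int) + 1)))).length : Int)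
      = ((PySem.Set.ofList camino).idxOf v : Int) + 1
  have hslice : PySem.List.slice camino none (some ((camino.idxOf v : Int) + 1))
      = camino.take (camino.idxOf v + 1) := by
    rw [show ((camino.idxOf v : Int) + 1) = (((camino.idxOf v + 1 : Nat) : Int)) by push_cast; ring,
        PySem.List.slice_to_natCast]
  rw [hslice, ← PySem.Set.update_nil_left, ← PySem.Set.update_nil_left camino,
      take_firstIdx_length camino [] v hv (by simp)]
  push_cast; ring

-- ===== VERDICT (by name: the statement is the Claim_ definition above) =====
theorem anonymize_walk_py_spec : Claim_equal_anonymize_walk_py := by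
  intro camino _
  unfold Spec_anonymize_walk_py anonymize_walk_py
  have h0 : (PySem.Dict.empty : PySem.Dict Int Int) = dictOf [] := by
    simp [dictOf, PySem.List.enumerate_nil]
  rw [h0, loop_spec camino [] [] List.nodup_nil, alt_eq_map]
  simp [PySem.Set.update_nil_left]
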